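-- pv_equiv track=rewrite | github.com/duykienvp/sigspatial-2019-geo-marketplace | searchable-encryption/searchableencryption/hve/hierarchicalencoding.py | decompose_full_node
-- ===== SOURCE A (Python) =====
-- def decompose_full_node(node_id, max_level):
--     """
--     Decompose a full node into smaller node at the max level max_level if the node is at the higher level
--     :param node_id: node id as (e.g) string at the form "011000"
--     :param max_level: the maximum level allowed
--     :return:
--     """
--     current_level = len(node_id) // 2
--     prev_ids = [node_id]
--     for i in range(max_level - current_level):
--         new_ids = list()
--         for an_id in prev_ids:
--             new_ids.append(an_id + '00')
--             new_ids.append(an_id + '01')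
--             new_ids.append(an_id + '10')
--             new_ids.append(an_id + '11')
--
--         prev_ids = new_ids
--
--     return prev_ids
-- ===== SOURCE B (Python) =====
-- def decompose_full_node(node_id, max_level):
--     d = max_level - len(node_id) // 2
--     return [node_id + s for s in _suffixes(max(d, 0))]
--
--
-- def _suffixes(d):
--     # all 2*d-character suffixes built from the pairs, prefix-first (lexicographic)
--     if d == 0:
--         return ['']
--     return [p + rest for p in ('00', '01', '10', '11') for rest in _suffixes(d - 1)]
-- ===== Notes on version B (the rewrite author's own statement) =====
-- stated objective: idiomatic
-- what changed: Replaces A's iterative level-by-level list doubling with a direct comprehension over recursively generated length-d suffix strings (prefix-first cartesian product), preserving the identical lexicographic order.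
import Mathlib
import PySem

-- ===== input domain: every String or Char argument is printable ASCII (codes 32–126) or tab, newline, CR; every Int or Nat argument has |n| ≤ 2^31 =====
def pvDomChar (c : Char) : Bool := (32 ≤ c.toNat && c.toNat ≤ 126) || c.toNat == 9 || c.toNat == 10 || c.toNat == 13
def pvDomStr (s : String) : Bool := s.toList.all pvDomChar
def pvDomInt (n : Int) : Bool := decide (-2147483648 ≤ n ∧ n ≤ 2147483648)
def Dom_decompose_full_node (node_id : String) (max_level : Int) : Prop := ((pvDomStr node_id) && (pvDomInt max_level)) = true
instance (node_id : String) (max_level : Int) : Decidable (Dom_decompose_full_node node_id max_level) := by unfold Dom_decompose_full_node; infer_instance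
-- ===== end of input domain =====

-- B replaces A's iterative level-by-level list doubling with a comprehension over
-- recursively generated length-d suffixes (same values, same lexicographic order); objective: idiomatic.

-- ===== PORT A =====
-- literal transliteration of A: for i in range(max_level - current_level): rebuild the list,
-- appending the four two-bit extensions of each id
def decompose_full_node (node_id : String) (max_level : Int) : List String :=
  let current_level : Int := PySem.Int.floordiv (PySem.Str.len node_id) 2
  (PySem.List.pyRange 0 (max_level - current_level) 1).foldl
    (fun prev_ids _i =>
      prev_ids.foldl
        (fun new_ids an_id =>
          new_ids ++ [an_id ++ "00"] ++ [an_id ++ "01"] ++ [an_id ++ "10"] ++ [an_id ++ "11"])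
        [])
    [node_id]

-- ===== PORT B =====
-- B-side helper: _suffixes(d), all 2*d-character suffixes, prefix-first
def pvSuffixes : Nat → List String
  | 0 => [""]
  | n + 1 => ["00", "01", "10", "11"].flatMap (fun p => (pvSuffixes n).map (fun rest => p ++ rest))

def decompose_full_node_alt (node_id : String) (max_level : Int) : List String :=
  let d : Int := max_level - PySem.Int.floordiv (PySem.Str.len node_id) 2
  (pvSuffixes (max d 0).toNat).map (fun s => node_id ++ s)

-- ===== PRECONDITION & SPEC =====
def Spec_decompose_full_node (node_id : String) (max_level : Int) (out : List String) : Prop := out = decompose_full_node_alt node_id max_level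
instance (node_id : String) (max_level : Int) (out : List String) : Decidable (Spec_decompose_full_node node_id max_level out) := by unfold Spec_decompose_full_node; infer_instance

-- ===== CLAIM (what is proved, stated in full; the proofs are below) =====
def Claim_equal_decompose_full_node : Prop := ∀ (node_id : String) (max_level : Int), Dom_decompose_full_node node_id max_level → Spec_decompose_full_node node_id max_level (decompose_full_node node_id max_level)

-- ===== LEMMAS AND PROOFS =====

-- A's one outer iteration, after the inner foldl is read as a flatMap
def pvStepA (prev : List String) : List String :=
  prev.flatMap (fun an_id => [an_id ++ "00", an_id ++ "01", an_id ++ "10", an_id ++ "11"])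

-- a foldl that ignores the list elements is function iteration
theorem pv_foldl_const {α β : Type} (f : α → α) (l : List β) (a : α) :
    l.foldl (fun acc _ => f acc) a = f^[l.length] a := by
  induction l generalizing a with
  | nil => rfl
  | cons x xs ih => simp [List.foldl, ih, Function.iterate_succ_apply]

-- the prefix-first suffix recursion also satisfies the suffix-last (snoc-style) recursion
theorem pvSuffixes_snoc (n : Nat) :
    pvSuffixes (n + 1) =
      (pvSuffixes n).flatMap (fun r => [r ++ "00", r ++ "01", r ++ "10", r ++ "11"]) := by
  induction n with
  | zero => decide
  | succ n ih =>
    show ["00", "01", "10", "11"].flatMap (fun p => (pvSuffixes (n + 1)).map (fun rest => p ++ rest))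
        = (["00", "01", "10", "11"].flatMap (fun p => (pvSuffixes n).map (fun rest => p ++ rest))).flatMap
            (fun r => [r ++ "00", r ++ "01", r ++ "10", r ++ "11"])
    rw [ih]
    simp [List.flatMap_map, List.map_flatMap, String.append_assoc]

-- loop invariant: n doublings of [x] list exactly x ++ each suffix of length 2n, in order
theorem pv_iter_stepA (x : String) (n : Nat) :
    pvStepA^[n] [x] = (pvSuffixes n).map (fun s => x ++ s) := by
  induction n with
  | zero => simp [pvSuffixes]
  | succ n ih =>
    rw [Function.iterate_succ_apply', ih, pvSuffixes_snoc]
    simp [pvStepA, List.flatMap_map, List.map_flatMap, String.append_assoc]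

-- ===== VERDICT (by name: the statement is the Claim_ definition above) =====
theorem decompose_full_node_spec : Claim_equal_decompose_full_node := by
  intro node_id max_level _hdom
  unfold Spec_decompose_full_node decompose_full_node decompose_full_node_alt
  have hinner : ∀ prev : List String,
      prev.foldl (fun new_ids an_id =>
          new_ids ++ [an_id ++ "00"] ++ [an_id ++ "01"] ++ [an_id ++ "10"] ++ [an_id ++ "11"])
        [] = pvStepA prev := by
    intro prev
    have := PySem.List.foldl_append_eq_flatMap
      (fun an_id => [an_id ++ "00", an_id ++ "01", an_id ++ "10", an_id ++ "11"]) prev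
      ([] : List String)
    simpa [pvStepA, List.append_assoc] using this
  simp only [hinner]
  rw [pv_foldl_const pvStepA, PySem.List.length_pyRange_one, pv_iter_stepA]
  congr 2
  omega
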